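-- pv_equiv track=rewrite | github.com/HwangHanJae/coding_test_pratice | 프로그래머스/Summer Winter Coding(~2018)/스킬트리/code.py | solution
-- ===== SOURCE A (Python) =====
-- def solution(skill, skill_trees):
--     skill_dic = {}
--     count = 0
--     for i,s in enumerate(skill):
--         skill_dic[s] = i
--     for skill in skill_trees:
--         users = [-1]
--         for s in skill:
--             try:
--                 number = skill_dic[s]
--                 if number-1 in users:
--                     users.append(number)
--                 else:
--                     break
--             except:
--                 pass
--         else:
--             count += 1
--     return count
-- ===== SOURCE B (Python) =====
-- def solution(skill, skill_trees):
--     rank = {c: i for i, c in enumerate(skill)}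
--     count = 0
--     for tree in skill_trees:
--         seq = [rank[c] for c in tree if c in rank]
--         firsts = list(dict.fromkeys(seq))
--         if firsts == list(range(len(firsts))):
--             count += 1
--     return count
-- ===== Notes on version B (the rewrite author's own statement) =====
-- stated objective: alternative
-- what changed: Instead of A's per-character unlock loop with a growing 'users' list and a linear 'number-1 in users' membership scan, B judges each tree by staged passes: filter the tree to its required-skill ranks, take first occurrences with dict.fromkeys, and accept iff that list is exactly range(len) (first occurrences must be 0,1,2,...).
import Mathlib
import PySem

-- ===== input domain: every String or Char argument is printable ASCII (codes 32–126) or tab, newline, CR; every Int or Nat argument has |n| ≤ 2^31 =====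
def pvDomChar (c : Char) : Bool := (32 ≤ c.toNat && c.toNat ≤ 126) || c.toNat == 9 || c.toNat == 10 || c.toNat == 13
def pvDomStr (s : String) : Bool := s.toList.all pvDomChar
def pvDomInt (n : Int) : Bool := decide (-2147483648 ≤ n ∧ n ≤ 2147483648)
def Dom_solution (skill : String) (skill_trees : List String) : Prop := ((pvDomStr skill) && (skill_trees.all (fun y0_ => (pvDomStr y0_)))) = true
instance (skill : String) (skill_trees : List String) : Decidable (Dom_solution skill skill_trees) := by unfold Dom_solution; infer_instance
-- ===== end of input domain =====

-- B checks each tree by staged passes (filter to ranks, first-occurrence dedup, compare with range) instead of A's growing membership list and per-character unlock loop.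


-- shared helper: the rank dict both Pythons build identically ({c: i for i, c in enumerate(skill)}, last wins)
def skillDic (skill : String) : PySem.Dict Char Int :=
  (PySem.List.enumerate skill.toList).foldl (fun d p => d.insert p.2 p.1) PySem.Dict.empty

-- ===== PORT A =====
-- inner for-loop over a tree: growing 'users' list, try/except KeyError as get?; true iff the loop finished (for/else)
def innerA (dic : PySem.Dict Char Int) : List Char → List Int → Bool
  | [], _ => true
  | c :: rest, users =>
    match dic.get? c with
    | some number =>
        if users.contains (number - 1) then innerA dic rest (users ++ [number]) else false
    | none => innerA dic rest users

def solution (skill : String) (skill_trees : List String) : Int :=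
  let dic := skillDic skill
  skill_trees.foldl (fun count tree => if innerA dic tree.toList [-1] then count + 1 else count) 0

-- ===== PORT B =====
-- per tree: seq = [rank[c] for c in tree if c in rank]; firsts = list(dict.fromkeys(seq)); accept iff firsts == list(range(len(firsts)))
def solution_alt (skill : String) (skill_trees : List String) : Int :=
  let rank := skillDic skill
  skill_trees.foldl (fun count tree =>
    let seq := tree.toList.filterMap rank.get?
    let firsts := PySem.List.dedup seq
    if firsts = PySem.List.pyRange 0 (firsts.length : Int) 1 then count + 1 else count) 0

-- ===== PRECONDITION & SPEC =====
def Spec_solution (skill : String) (skill_trees : List String) (out : Int) : Prop := out = solution_alt skill skill_trees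
instance (skill : String) (skill_trees : List String) (out : Int) : Decidable (Spec_solution skill skill_trees out) := by unfold Spec_solution; infer_instance

-- ===== CLAIM (what is proved, stated in full; the proofs are below) =====
def Claim_equal_solution : Prop := ∀ (skill : String) (skill_trees : List String), Dom_solution skill skill_trees → Spec_solution skill skill_trees (solution skill skill_trees)

-- ===== LEMMAS AND PROOFS =====

-- validity of a rank sequence with frontier m (proof-only abstraction of A's inner loop)
def val : List Int → Int → Bool
  | [], _ => true
  | k :: r, m => if k > m + 1 then false else val r (max m k)

-- every value stored in skillDic is a nonnegative enumerate index
lemma foldl_insert_nonneg (l : List (Int × Char)) (d : PySem.Dict Char Int)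
    (hd : ∀ c k, d.get? c = some k → 0 ≤ k) (hl : ∀ p ∈ l, 0 ≤ p.1) :
    ∀ c k, (l.foldl (fun d p => d.insert p.2 p.1) d).get? c = some k → 0 ≤ k := by
  induction l generalizing d with
  | nil => simpa using hd
  | cons p rest ih =>
    intro c k
    simp only [List.foldl_cons]
    refine ih _ ?_ (fun q hq => hl q (by simp [hq])) c k
    intro c' k' h
    by_cases hc : c' = p.2
    · subst hc
      rw [PySem.Dict.get?_insert_self] at h
      cases h
      exact hl p (by simp)
    · rw [PySem.Dict.get?_insert, if_neg hc] at h
      exact hd c' k' h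

lemma skillDic_nonneg (skill : String) :
    ∀ c k, (skillDic skill).get? c = some k → 0 ≤ k := by
  refine foldl_insert_nonneg _ _ (by simp [PySem.Dict.get?_empty]) ?_
  intro p hp
  rw [PySem.List.mem_enumerate_iff] at hp
  obtain ⟨j, hj, rfl⟩ := hp
  simp

-- A's users list is always the contiguous range [-1, m]; its inner loop computes val of the filtered rank sequence
lemma innerA_eq_val (dic : PySem.Dict Char Int) (hpos : ∀ c k, dic.get? c = some k → 0 ≤ k) :
    ∀ (cs : List Char) (users : List Int) (m : Int),
      (∀ x, x ∈ users ↔ -1 ≤ x ∧ x ≤ m) →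
      innerA dic cs users = val (cs.filterMap dic.get?) m := by
  intro cs
  induction cs with
  | nil => intro users m _; rfl
  | cons c rest ih =>
    intro users m hinv
    simp only [innerA, List.filterMap_cons]
    cases hget : dic.get? c with
    | none => exact ih users m hinv
    | some k =>
      have hk : 0 ≤ k := hpos c k hget
      simp only [val]
      by_cases hle : k > m + 1
      · have hco : users.contains (k - 1) = false := by
          rw [← Bool.not_eq_true, List.contains_iff_mem, hinv]
          omega
        rw [hco, if_pos hle]
        simp
      · have hco : users.contains (k - 1) = true := by
          rw [List.contains_iff_mem, hinv]
          omega
        rw [hco, if_pos rfl, if_neg hle]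
        refine ih _ _ ?_
        intro x
        simp only [List.mem_append, List.mem_singleton, hinv x]
        omega

-- foldl Set.add only ever appends: the accumulator stays a prefix
lemma prefix_foldl_add (seq : List Int) :
    ∀ acc : List Int, ∃ t, seq.foldl PySem.Set.add acc = acc ++ t := by
  induction seq with
  | nil => intro acc; exact ⟨[], by simp⟩
  | cons k r ih =>
    intro acc
    obtain ⟨t, ht⟩ := ih (PySem.Set.add acc k)
    simp only [List.foldl_cons]
    by_cases hc : PySem.Set.contains acc k = true
    · have ha : PySem.Set.add acc k = acc := by unfold PySem.Set.add; rw [if_pos hc]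
      rw [ha] at ht ⊢
      exact ⟨t, ht⟩
    · have ha : PySem.Set.add acc k = acc ++ [k] := by unfold PySem.Set.add; rw [if_neg hc]
      rw [ha] at ht ⊢
      exact ⟨k :: t, by rw [ht]; simp⟩

-- core: val seq m ↔ deduping seq onto the prefix [0..m] yields exactly an initial range
lemma val_iff_range (seq : List Int) :
    ∀ m : Int, -1 ≤ m → (∀ x ∈ seq, 0 ≤ x) →
      (val seq m = true ↔
        seq.foldl PySem.Set.add (PySem.List.pyRange 0 (m+1) 1) =
          PySem.List.pyRange 0 (((seq.foldl PySem.Set.add (PySem.List.pyRange 0 (m+1) 1)).length : Int)) 1) := by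
  induction seq with
  | nil =>
    intro m hm _
    simp only [List.foldl_nil]
    have hlen : (((PySem.List.pyRange 0 (m+1) 1).length : Int)) = m + 1 := by
      rw [PySem.List.length_pyRange_one]
      omega
    rw [hlen]
    exact ⟨fun _ => rfl, fun _ => rfl⟩
  | cons k r ih =>
    intro m hm hpos
    have hk : 0 ≤ k := hpos k (by simp)
    have hpos' : ∀ x ∈ r, 0 ≤ x := fun x hx => hpos x (by simp [hx])
    simp only [List.foldl_cons, val]
    by_cases hgt : k > m + 1
    · rw [if_pos hgt]
      -- add appends k (k is not in [0..m]); the result keeps [0..m] ++ [k] as a prefix, so index m+1 holds k ≠ m+1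
      have hadd : PySem.Set.add (PySem.List.pyRange 0 (m+1) 1) k = PySem.List.pyRange 0 (m+1) 1 ++ [k] := by
        unfold PySem.Set.add
        rw [if_neg]
        simp only [PySem.Set.contains, List.contains_iff_mem, PySem.List.mem_pyRange_one]
        omega
      rw [hadd]
      constructor
      · intro h; exact absurd h Bool.false_ne_true
      · intro h
        exfalso
        obtain ⟨t, ht⟩ := prefix_foldl_add r (PySem.List.pyRange 0 (m+1) 1 ++ [k])
        set res := r.foldl PySem.Set.add (PySem.List.pyRange 0 (m+1) 1 ++ [k]) with hres
        have hlenp : (PySem.List.pyRange 0 (m+1) 1).length = (m+1).toNat := by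
          rw [PySem.List.length_pyRange_one]; omega
        have hlen : (m+1).toNat < res.length := by
          rw [ht]
          simp only [List.length_append, List.length_append, hlenp, List.length_singleton]
          omega
        have hidx : res[(m+1).toNat]? = some k := by
          rw [ht, List.append_assoc, List.getElem?_append_right (le_of_eq hlenp)]
          rw [hlenp, Nat.sub_self]
          rfl
        rw [h] at hidx
        rw [PySem.List.getElem?_pyRange_one] at hidx
        rw [if_pos (by omega : (m+1).toNat < (((res.length : Int)) - 0).toNat)] at hidx
        have hk2 := Option.some.inj hidx
        omega
    · rw [if_neg hgt]
      by_cases hle : k ≤ m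
      · -- k already present: add is a no-op, max m k = m
        have hadd : PySem.Set.add (PySem.List.pyRange 0 (m+1) 1) k = PySem.List.pyRange 0 (m+1) 1 := by
          unfold PySem.Set.add
          rw [if_pos]
          simp only [PySem.Set.contains, List.contains_iff_mem, PySem.List.mem_pyRange_one]
          omega
        have hmax : max m k = m := by omega
        rw [hadd, hmax]
        exact ih m hm hpos'
      · -- k = m + 1: the accumulator grows to [0..m+1]
        have hkm : k = m + 1 := by omega
        subst hkm
        have hsucc : PySem.List.pyRange 0 (m+2) 1 = PySem.List.pyRange 0 (m+1) 1 ++ [m+1] := by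
          have h2 := PySem.List.pyRange_one_succ_right (a := 0) (b := m+1) (by omega)
          rw [show m + 1 + 1 = m + 2 by ring] at h2
          exact h2
        have hadd : PySem.Set.add (PySem.List.pyRange 0 (m+1) 1) (m+1) = PySem.List.pyRange 0 (m+2) 1 := by
          unfold PySem.Set.add
          rw [if_neg, hsucc]
          simp only [PySem.Set.contains, List.contains_iff_mem, PySem.List.mem_pyRange_one]
          omega
        have hmax : max m (m+1) = m + 1 := by omega
        rw [hadd, hmax]
        have h3 := ih (m+1) (by omega) hpos'
        rw [show m + 1 + 1 = m + 2 by ring] at h3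
        exact h3

-- B's per-tree test is A's inner-loop verdict
lemma testB_iff (dic : PySem.Dict Char Int) (hpos : ∀ c k, dic.get? c = some k → 0 ≤ k)
    (cs : List Char) :
    (PySem.List.dedup (cs.filterMap dic.get?) =
       PySem.List.pyRange 0 (((PySem.List.dedup (cs.filterMap dic.get?)).length : Int)) 1)
      ↔ val (cs.filterMap dic.get?) (-1) = true := by
  have hseqpos : ∀ x ∈ cs.filterMap dic.get?, 0 ≤ x := by
    intro x hx
    rw [List.mem_filterMap] at hx
    obtain ⟨c, _, hc⟩ := hx
    exact hpos c x hc
  have hded : PySem.List.dedup (cs.filterMap dic.get?) = (cs.filterMap dic.get?).foldl PySem.Set.add [] := rfl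
  have hbase : PySem.List.pyRange 0 ((-1 : Int) + 1) 1 = [] := PySem.List.pyRange_one_eq_nil (by omega)
  have h := val_iff_range (cs.filterMap dic.get?) (-1) (by omega) hseqpos
  rw [hbase] at h
  rw [hded]
  exact h.symm

-- congruence for the counting folds when the per-tree tests agree
lemma foldl_if_congr (P Q : String → Prop) [DecidablePred P] [DecidablePred Q]
    (l : List String) (h : ∀ t ∈ l, P t ↔ Q t) :
    ∀ n : Int, l.foldl (fun c t => if P t then c + 1 else c) n
      = l.foldl (fun c t => if Q t then c + 1 else c) n := by
  induction l with
  | nil => intro n; rfl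
  | cons t rest ih =>
    intro n
    simp only [List.foldl_cons]
    have ht := h t (by simp)
    have hrest : ∀ u ∈ rest, P u ↔ Q u := fun u hu => h u (by simp [hu])
    by_cases hp : P t
    · rw [if_pos hp, if_pos (ht.mp hp)]
      exact ih hrest (n + 1)
    · rw [if_neg hp, if_neg (fun hq => hp (ht.mpr hq))]
      exact ih hrest n

-- ===== VERDICT (by name: the statement is the Claim_ definition above) =====
theorem solution_spec : Claim_equal_solution := by
  intro skill skill_trees _
  unfold Spec_solution solution solution_alt
  refine foldl_if_congr _ _ skill_trees ?_ 0
  intro tree _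
  have hA : innerA (skillDic skill) tree.toList [-1]
      = val (tree.toList.filterMap (skillDic skill).get?) (-1) := by
    refine innerA_eq_val _ (skillDic_nonneg skill) _ _ _ ?_
    intro x
    simp only [List.mem_singleton]
    omega
  rw [hA]
  exact (testB_iff (skillDic skill) (skillDic_nonneg skill) tree.toList).symm
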